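-- pv_equiv track=rewrite | github.com/Jonathanseng/Linear-Algebra | 43. Vector Spaces | Definition & Examples.py | is_vector_space
-- ===== SOURCE A (Python) =====
-- def is_vector_space(V):
--   """
--   This function checks if a set is a vector space.
--
--   Args:
--     V: The set to be checked.
--
--   Returns:
--     True if the set is a vector space, False otherwise.
--   """
--
--   # Check if the set is closed under addition.
--
--   for v1 in V:
--     for v2 in V:
--       if v1 + v2 not in V:
--         return False
--
--   # Check if the set is closed under scalar multiplication.
--
--   for v in V:
--     for c in range(-10, 11):
--       if c * v not in V:
--         return False
--
--   # Check if the set has a zero vector.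
--
--   if 0 not in V:
--     return False
--
--   return True
-- ===== SOURCE B (Python) =====
-- def is_vector_space(V):
--     # A finite set of integers closed under addition and under scalar
--     # multiplication (in particular by 2) that contains 0 can only be {0}:
--     # doubling its maximum/minimum forces both to be 0.
--     return bool(V) and all(v == 0 for v in V)
-- ===== Notes on version B (the rewrite author's own statement) =====
-- stated objective: simpler
-- what changed: B replaces the nested membership-scan loops by the mathematical characterisation that the only finite integer set closed under addition and scalar multiplication (in particular doubling) and containing 0 is the all-zero set, so it is one short-circuit pass checking that V is nonempty and all-zero.
import Mathlib
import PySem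

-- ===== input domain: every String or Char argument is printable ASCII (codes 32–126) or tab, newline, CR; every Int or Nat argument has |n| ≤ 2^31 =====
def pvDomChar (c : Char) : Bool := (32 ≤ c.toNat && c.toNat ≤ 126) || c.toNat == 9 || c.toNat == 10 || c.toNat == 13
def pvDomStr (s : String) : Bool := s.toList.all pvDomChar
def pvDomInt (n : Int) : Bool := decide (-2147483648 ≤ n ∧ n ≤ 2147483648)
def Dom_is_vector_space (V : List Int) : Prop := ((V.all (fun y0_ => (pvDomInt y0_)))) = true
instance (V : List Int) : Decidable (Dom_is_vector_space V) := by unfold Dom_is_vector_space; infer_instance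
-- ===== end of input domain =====

-- B replaces A's cubic nested membership scans by one short-circuit pass: a finite integer set
-- closed under A's operations and containing 0 must be exactly the all-zero set (objective: simpler).

-- ===== PORT A =====
-- nested for-loops with early 'return False' become List.all over the same iterations, in A's order
def is_vector_space (V : List Int) : Bool :=
  if V.all (fun v1 => V.all (fun v2 => decide ((v1 + v2) ∈ V))) then
    if V.all (fun v => (PySem.List.pyRange (-10) 11 1).all (fun c => decide ((c * v) ∈ V))) then
      if decide ((0 : Int) ∈ V) then true else false
    else false
  else false

-- ===== PORT B =====
def is_vector_space_alt (V : List Int) : Bool :=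
  !V.isEmpty && V.all (fun v => v == 0)

-- ===== PRECONDITION & SPEC =====
def Spec_is_vector_space (V : List Int) (out : Bool) : Prop := out = is_vector_space_alt V
instance (V : List Int) (out : Bool) : Decidable (Spec_is_vector_space V out) := by unfold Spec_is_vector_space; infer_instance

-- ===== CLAIM (what is proved, stated in full; the proofs are below) =====
def Claim_equal_is_vector_space : Prop := ∀ (V : List Int), Dom_is_vector_space V → Spec_is_vector_space V (is_vector_space V)

-- ===== LEMMAS AND PROOFS =====

lemma a_iff (V : List Int) :
    is_vector_space V = true ↔
      ((∀ v1 ∈ V, ∀ v2 ∈ V, (v1 + v2) ∈ V) ∧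
       (∀ v ∈ V, ∀ c ∈ PySem.List.pyRange (-10) 11 1, (c * v) ∈ V) ∧
       (0 : Int) ∈ V) := by
  simp only [is_vector_space, List.all_eq_true, decide_eq_true_eq]
  split_ifs with h1 h2 h0 <;> simp_all

lemma alt_iff (V : List Int) :
    is_vector_space_alt V = true ↔ (V ≠ [] ∧ ∀ v ∈ V, v = 0) := by
  simp [is_vector_space_alt, List.isEmpty_iff]

-- a set closed under doubling and containing 0 is all-zero
lemma all_zero_of_double (V : List Int) (hd : ∀ v ∈ V, 2 * v ∈ V) (h0 : (0 : Int) ∈ V) :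
    ∀ v ∈ V, v = 0 := by
  have hne : V.toFinset.Nonempty := ⟨0, by simpa using h0⟩
  obtain ⟨m, hmV, hmax⟩ := Finset.exists_max_image V.toFinset id hne
  obtain ⟨n, hnV, hmin⟩ := Finset.exists_min_image V.toFinset id hne
  simp only [List.mem_toFinset, id] at hmV hnV hmax hmin
  have hm2 : 2 * m ≤ m := hmax _ (by simpa using hd m hmV)
  have hn2 : n ≤ 2 * n := hmin _ (by simpa using hd n hnV)
  intro v hv
  have h1 := hmax v (by simpa using hv)
  have h2 := hmin v (by simpa using hv)
  simp only [id] at h1 h2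
  omega

lemma two_mem_range : (2 : Int) ∈ PySem.List.pyRange (-10) 11 1 := by decide

-- ===== VERDICT (by name: the statement is the Claim_ definition above) =====
theorem is_vector_space_spec : Claim_equal_is_vector_space := by
  intro V _
  unfold Spec_is_vector_space
  refine Bool.eq_iff_iff.mpr ((a_iff V).trans (Iff.trans ?_ (alt_iff V).symm))
  constructor
  · rintro ⟨_, hsc, h0⟩
    have hd : ∀ v ∈ V, 2 * v ∈ V := fun v hv => hsc v hv 2 two_mem_range
    exact ⟨by rintro rfl; simp at h0, all_zero_of_double V hd h0⟩
  · rintro ⟨hne, hz⟩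
    have h0 : (0 : Int) ∈ V := by
      cases V with
      | nil => exact absurd rfl hne
      | cons a t => have := hz a (List.mem_cons_self); simpa [this] using List.mem_cons_self
    refine ⟨?_, ?_, h0⟩
    · intro v1 h1 v2 h2
      have e1 := hz v1 h1; have e2 := hz v2 h2
      simpa [e1, e2] using h0
    · intro v hv c _
      have e := hz v hv
      simpa [e] using h0
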